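-- pv_equiv track=rewrite | github.com/enayat-hussain/aesop-ir-engine | porter.py | condition_v
-- ===== SOURCE A (Python) =====
-- def condition_v(stem: str) -> bool:
--     """
--     Returns whether condition *v* is true for a given stem (= the stem contains a vowel).
--     :param stem: Word stem to check
--     :return: True if the condition *v* holds
--     """
--     vowels = 'aeiou'
--     prev_letter = ''
--     consonants = 'bcdfghjklmnpqrstvwxyz'
--
--     for letter in stem.lower():
--         if letter in vowels or (letter == 'y' and prev_letter in consonants):
--             return True
--         prev_letter = letter
--
--     return False
-- ===== SOURCE B (Python) =====
-- def condition_v(stem: str) -> bool: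
--     s = stem.lower()
--     return any(c in 'aeiou' for c in s) or any(
--         a in 'bcdfghjklmnpqrstvwxyz' and b == 'y' for a, b in zip(s, s[1:]))
-- ===== Notes on version B (the rewrite author's own statement) =====
-- stated objective: idiomatic
-- what changed: Replaces the stateful early-return loop carrying a prev_letter variable with two stateless any() passes: one for a vowel anywhere, one over adjacent pairs zip(s, s[1:]) for a consonant immediately followed by 'y'.
-- intended difference: On stems whose lowered first letter is 'y' and which contain no vowel and no consonant immediately followed by 'y', A returns True (because prev_letter starts as '' and '' in consonants is True, so a leading 'y' counts as a vowel) while B returns False, which is intended since Porter's condition v treats word-initial y as a consonant. — e.g. on condition_v("y"): A returns true, B returns false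
import Mathlib
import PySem

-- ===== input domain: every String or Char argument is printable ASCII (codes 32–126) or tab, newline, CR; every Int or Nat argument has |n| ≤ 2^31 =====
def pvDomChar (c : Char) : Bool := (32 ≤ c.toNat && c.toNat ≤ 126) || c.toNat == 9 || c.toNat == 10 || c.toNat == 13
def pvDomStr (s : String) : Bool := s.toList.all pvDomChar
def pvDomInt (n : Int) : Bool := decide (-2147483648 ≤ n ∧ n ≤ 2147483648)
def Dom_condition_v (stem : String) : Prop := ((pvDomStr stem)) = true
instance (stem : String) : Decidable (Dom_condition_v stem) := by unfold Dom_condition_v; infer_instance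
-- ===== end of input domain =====

-- B replaces A's stateful early-return scan with two stateless any-passes (vowel anywhere; adjacent
-- consonant-'y' pair over zip(s, s[1:])); objective: idiomatic, same cost.

def pvVowels : List Char := ['a', 'e', 'i', 'o', 'u']
def pvConsonants : List Char :=
  ['b','c','d','f','g','h','j','k','l','m','n','p','q','r','s','t','v','w','x','y','z']

-- ===== PORT A =====
-- prev_letter is a Python str; ported as List Char, with 'prev_letter in consonants' the
-- exact Python substring test PySem.Chars.isIn (so the initial '' is "in" consonants).
def condALoop : List Char → List Char → Bool
  | [], _ => false
  | x :: xs, prev =>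
    if x ∈ pvVowels || (x == 'y' && PySem.Chars.isIn prev pvConsonants) then true
    else condALoop xs [x]

def condition_v (stem : String) : Bool :=
  condALoop (PySem.Str.lower stem).toList []

-- ===== PORT B =====
-- zip(s, s[1:]): s[1:] is ported as l.tail (exact: the drop-from-front slice).
def condition_v_alt (stem : String) : Bool :=
  let l := (PySem.Str.lower stem).toList
  l.any (fun c => c ∈ pvVowels) ||
    (l.zip l.tail).any (fun p => p.1 ∈ pvConsonants && p.2 == 'y')

-- ===== PRECONDITION & SPEC =====
-- On stems whose lowered first letter is 'y' and which contain no vowel and no consonant immediately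
-- followed by 'y', A returns True (prev_letter starts as '' and '' in consonants is True in Python, so
-- a leading 'y' counts as a vowel) while B returns False, which is intended: Porter's condition v
-- treats word-initial y as a consonant.
def D_condition_v (stem : String) : Prop :=
  let l := (PySem.Str.lower stem).toList
  l.head? = some 'y' ∧ (∀ c ∈ l, c ∉ pvVowels) ∧
    (∀ p ∈ l.zip l.tail, ¬(p.1 ∈ pvConsonants ∧ p.2 = 'y'))
instance (stem : String) : Decidable (D_condition_v stem) := by unfold D_condition_v; infer_instance

def Spec_condition_v (stem : String) (out : Bool) : Prop :=
  ¬ D_condition_v stem → out = condition_v_alt stem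
instance (stem : String) (out : Bool) : Decidable (Spec_condition_v stem out) := by
  unfold Spec_condition_v; infer_instance

def pvDiffWitness_condition_v : String := "y"
def pvDiffWitnessOut_condition_v : Bool × Bool := (true, false)

-- ===== CLAIM (what is proved, stated in full; the proofs are below) =====
def Claim_unchanged_condition_v : Prop :=
  ∀ (stem : String), Dom_condition_v stem → Spec_condition_v stem (condition_v stem)
def Claim_changed_condition_v : Prop :=
  Dom_condition_v (pvDiffWitness_condition_v) ∧ D_condition_v (pvDiffWitness_condition_v) ∧
    condition_v (pvDiffWitness_condition_v) = pvDiffWitnessOut_condition_v.1 ∧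
    condition_v_alt (pvDiffWitness_condition_v) = pvDiffWitnessOut_condition_v.2 ∧
    pvDiffWitnessOut_condition_v.1 ≠ pvDiffWitnessOut_condition_v.2
def Claim_exact_condition_v : Prop :=
  ∀ (stem : String), Dom_condition_v stem → D_condition_v stem →
    condition_v stem ≠ condition_v_alt stem

-- ===== LEMMAS AND PROOFS =====

-- a one-character Python string is "in" another string iff the character occurs in it
theorem isIn_singleton (c : Char) (s : List Char) :
    PySem.Chars.isIn [c] s = s.contains c := by
  by_cases h : c ∈ s
  · rw [(PySem.Chars.isIn_iff_infix [c] s).2 ((List.singleton_infix_iff c s).2 h)]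
    simpa using h
  · rw [(PySem.Chars.isIn_eq_false_iff [c] s).2
      (fun hinf => h ((List.singleton_infix_iff c s).1 hinf))]
    simpa using h

-- loop invariant: after the first step, A's loop with single-char prev = B's two passes over (c :: xs)
theorem condALoop_single (xs : List Char) (c : Char) :
    condALoop xs [c] =
      (xs.any (fun a => a ∈ pvVowels) ||
        ((c :: xs).zip xs).any (fun p => p.1 ∈ pvConsonants && p.2 == 'y')) := by
  induction xs generalizing c with
  | nil => simp [condALoop]
  | cons a t ih =>
    have hyv : ('y' ∈ pvVowels) = False := by decide
    rw [condALoop, isIn_singleton]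
    by_cases h2 : a = 'y'
    · subst h2
      by_cases h3 : c ∈ pvConsonants
      · simp [h3, List.contains_eq_mem]
      · simp [h3, hyv, ih 'y', List.contains_eq_mem]
    · have h2' : (a == 'y') = false := by simpa using h2
      by_cases h1 : a ∈ pvVowels
      · simp [h1]
      · by_cases h3 : c ∈ pvConsonants <;> simp [h1, h2', h3, ih a]

theorem unchanged_core (stem : String) (hD : ¬ D_condition_v stem) :
    condition_v stem = condition_v_alt stem := by
  unfold condition_v condition_v_alt
  simp only []
  cases hl : (PySem.Str.lower stem).toList with
  | nil => simp [condALoop]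
  | cons x xs =>
    by_cases hv : x ∈ pvVowels
    · simp [condALoop, hv]
    · by_cases hy : x = 'y'
      · -- A returns true immediately ('' is in consonants); ¬D_ forces B true as well
        subst hy
        have hA : condALoop ('y' :: xs) [] = true := by
          simp [condALoop, PySem.Chars.isIn_nil]
        rw [hA]
        simp only [D_condition_v, hl] at hD
        push Not at hD
        have hD' := hD (by simp)
        symm
        simp only [Bool.or_eq_true, List.any_eq_true]
        by_cases hall : ∀ cc ∈ 'y' :: xs, cc ∉ pvVowels
        · obtain ⟨p, hp, hp1, hp2⟩ := hD' hall
          exact Or.inr ⟨p, hp, by simp [hp1, hp2]⟩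
        · push Not at hall
          obtain ⟨cc, hcc, hcv⟩ := hall
          exact Or.inl ⟨cc, hcc, by simpa using hcv⟩
      · -- first letter neither vowel nor 'y': A's loop continues with prev = [x]
        have hA : condALoop (x :: xs) [] = condALoop xs [x] := by
          simp [condALoop, hv, hy]
        rw [hA, condALoop_single xs x]
        simp [hv]

-- ===== VERDICT (by name: the statement is the Claim_ definition above) =====
theorem condition_v_spec : Claim_unchanged_condition_v := by
  intro stem _ hD
  exact unchanged_core stem hD

theorem pvLowerY : (PySem.Str.lower "y").toList = ['y'] := by rfl

theorem condition_v_changed : Claim_changed_condition_v := by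
  unfold Claim_changed_condition_v
  refine ⟨by rfl, ?_, by rfl, by rfl, by decide⟩
  unfold D_condition_v pvDiffWitness_condition_v
  simp only []
  rw [pvLowerY]
  exact ⟨rfl, by simp [pvVowels], by simp⟩

theorem condition_v_tight : Claim_exact_condition_v := by
  intro stem _ hD
  obtain ⟨hhead, hvow, hpair⟩ := hD
  have hA : condition_v stem = true := by
    unfold condition_v
    cases hl : (PySem.Str.lower stem).toList with
    | nil => rw [hl] at hhead; simp at hhead
    | cons x xs =>
      rw [hl] at hhead
      simp only [List.head?_cons, Option.some.injEq] at hhead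
      subst hhead
      simp [condALoop, PySem.Chars.isIn_nil]
  have hB : condition_v_alt stem = false := by
    unfold condition_v_alt
    simp only [Bool.or_eq_false_iff, List.any_eq_false]
    refine ⟨fun c hc => by simpa using hvow c hc, fun p hp => ?_⟩
    have := hpair p hp
    simp only [Bool.and_eq_true, not_and, decide_eq_true_eq, beq_iff_eq]
    intro h1 h2
    exact this ⟨h1, h2⟩
  rw [hA, hB]; simp
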